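-- pv_equiv track=rewrite | github.com/minjung03/COSPRO_Python | COS PRO 기출 6차/6차 2급 5_initial_code.py | solution
-- ===== SOURCE A (Python) =====
-- def solution(money, price, n):
--     answer = 0
--     empty_bottle = answer = money // price
--     while n <= empty_bottle:  # while문을 빠져나가게 해야한다, n 혹은 empty_bottle 변화시키기
--         empty_bottle = empty_bottle - n   # empty_bottle을 n개 만큼 소비해야 한다
--         answer += 1
--         empty_bottle += 1
--
--     return answer
-- ===== SOURCE B (Python) =====
-- def solution(money, price, n):
--     bottles = money // price
--     if n >= 2 and bottles >= n:
--         return bottles + (bottles - n) // (n - 1) + 1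
--     return bottles
-- ===== Notes on version B (the rewrite author's own statement) =====
-- stated objective: faster
-- what changed: Replaces the bottle-exchange simulation loop with a closed-form floor-division formula (each exchange nets n-1 empties, so the number of exchanges is (b-n)//(n-1)+1).
-- outside the precondition, e.g. on solution(10, 3, 1): A does not finish within the time limit, B returns 3; on solution(5, 0, 3): A raises ZeroDivisionError, B raises ZeroDivisionError
import Mathlib
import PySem

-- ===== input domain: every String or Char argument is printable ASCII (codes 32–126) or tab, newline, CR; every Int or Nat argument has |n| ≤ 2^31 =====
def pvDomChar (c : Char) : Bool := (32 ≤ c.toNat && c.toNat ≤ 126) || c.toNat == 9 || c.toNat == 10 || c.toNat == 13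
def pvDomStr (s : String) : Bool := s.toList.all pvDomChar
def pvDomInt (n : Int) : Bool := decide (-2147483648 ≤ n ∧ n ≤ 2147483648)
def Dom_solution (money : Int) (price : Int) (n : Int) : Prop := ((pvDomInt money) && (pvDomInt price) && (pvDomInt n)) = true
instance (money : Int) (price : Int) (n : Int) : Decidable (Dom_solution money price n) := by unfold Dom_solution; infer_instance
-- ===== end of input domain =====

-- B replaces A's bottle-exchange simulation loop with a closed-form floor-division formula (O(1) vs O(money/(price*(n-1)))).


-- ===== PORT A =====
-- the while loop, fuel only for totality (Pre_ guarantees the loop is left before fuel runs out)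
def solutionLoop (fuel : Nat) (n : Int) (answer : Int) (empty_bottle : Int) : Int :=
  match fuel with
  | 0 => answer
  | fuel + 1 =>
    if n ≤ empty_bottle then
      solutionLoop fuel n (answer + 1) (empty_bottle - n + 1)
    else answer

def solution (money : Int) (price : Int) (n : Int) : Int :=
  let empty_bottle := PySem.Int.floordiv money price
  solutionLoop (empty_bottle + 1).toNat n empty_bottle empty_bottle

-- ===== PORT B =====
def solution_alt (money : Int) (price : Int) (n : Int) : Int :=
  let bottles := PySem.Int.floordiv money price
  if 2 ≤ n ∧ n ≤ bottles then
    bottles + PySem.Int.floordiv (bottles - n) (n - 1) + 1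
  else bottles

-- ===== PRECONDITION & SPEC =====
-- Pre_ excludes price = 0 (A raises ZeroDivisionError) and n ≤ 1 with money//price ≥ n (A's while loop never terminates).
def Pre_solution (money : Int) (price : Int) (n : Int) : Prop :=
  price ≠ 0 ∧ (2 ≤ n ∨ PySem.Int.floordiv money price < n)
instance (money : Int) (price : Int) (n : Int) : Decidable (Pre_solution money price n) := by unfold Pre_solution; infer_instance
def pvWitness_solution : Int × Int × Int := (20, 3, 2)

def Spec_solution (money : Int) (price : Int) (n : Int) (out : Int) : Prop := out = solution_alt money price n
instance (money : Int) (price : Int) (n : Int) (out : Int) : Decidable (Spec_solution money price n out) := by unfold Spec_solution; infer_instance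

-- ===== CLAIM (what is proved, stated in full; the proofs are below) =====
def Claim_equal_solution : Prop := ∀ (money : Int) (price : Int) (n : Int), Dom_solution money price n → Pre_solution money price n → Spec_solution money price n (solution money price n)

-- ===== LEMMAS AND PROOFS =====

-- loop invariant: with enough fuel and 2 ≤ n ≤ e, the loop returns a + (e-n)//(n-1) + 1
theorem solutionLoop_closed (n : Int) (hn : 2 ≤ n) :
    ∀ (fuel : Nat) (a e : Int), n ≤ e →
      PySem.Int.floordiv (e - n) (n - 1) + 1 ≤ (fuel : Int) →
      solutionLoop fuel n a e = a + PySem.Int.floordiv (e - n) (n - 1) + 1 := by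
  intro fuel
  induction fuel with
  | zero =>
    intro a e he hf
    exfalso
    have h0 : (0 : Int) ≤ PySem.Int.floordiv (e - n) (n - 1) := by
      rw [PySem.Int.floordiv_eq_ediv_of_pos (by omega)]
      exact Int.ediv_nonneg (by omega) (by omega)
    simp at hf; omega
  | succ f ih =>
    intro a e he hf
    rw [solutionLoop, if_pos he]
    by_cases h2 : n ≤ e - n + 1
    · -- still looping: (e - n + 1 - n) // (n-1) = (e-n)//(n-1) - 1
      have hq : PySem.Int.floordiv (e - n + 1 - n) (n - 1)
          = PySem.Int.floordiv (e - n) (n - 1) - 1 := by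
        rw [PySem.Int.floordiv_eq_ediv_of_pos (by omega),
            PySem.Int.floordiv_eq_ediv_of_pos (by omega)]
        have : e - n + 1 - n = (e - n) + (-1) * (n - 1) := by ring
        rw [this, Int.add_mul_ediv_right _ _ (by omega : n - 1 ≠ 0)]
        ring
      have := ih (a + 1) (e - n + 1) h2 (by push_cast at hf ⊢; omega)
      rw [this, hq]; ring
    · -- last iteration: 0 ≤ e - n < n - 1, quotient is 0
      have hq : PySem.Int.floordiv (e - n) (n - 1) = 0 := by
        rw [PySem.Int.floordiv_eq_ediv_of_pos (by omega)]
        exact Int.ediv_eq_zero_of_lt (by omega) (by omega)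
      have hstop : solutionLoop f n (a + 1) (e - n + 1) = a + 1 := by
        cases f with
        | zero => rfl
        | succ f' => rw [solutionLoop, if_neg (by omega)]
      rw [hstop, hq]; ring

theorem solutionLoop_stop (fuel : Nat) (n a e : Int) (h : ¬ n ≤ e) :
    solutionLoop fuel n a e = a := by
  cases fuel with
  | zero => rfl
  | succ f => rw [solutionLoop, if_neg h]

-- ===== VERDICT (by name: the statement is the Claim_ definition above) =====
theorem solution_spec : Claim_equal_solution := by
  intro money price n _hdom hpre
  obtain ⟨_hp, hcase⟩ := hpre
  show solution money price n = solution_alt money price n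
  simp only [solution, solution_alt]
  generalize hb : PySem.Int.floordiv money price = b
  rw [hb] at hcase
  by_cases hle : n ≤ b
  · have hn : 2 ≤ n := by omega
    have hq0 : (0 : Int) ≤ PySem.Int.floordiv (b - n) (n - 1) := by
      rw [PySem.Int.floordiv_eq_ediv_of_pos (by omega)]
      exact Int.ediv_nonneg (by omega) (by omega)
    have hqb : PySem.Int.floordiv (b - n) (n - 1) ≤ b - n := by
      rw [PySem.Int.floordiv_eq_ediv_of_pos (by omega)]
      exact Int.ediv_le_self (n - 1) (by omega)
    have hfuel : PySem.Int.floordiv (b - n) (n - 1) + 1 ≤ ((b + 1).toNat : Int) := by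
      omega
    rw [solutionLoop_closed n hn _ b b hle hfuel, if_pos ⟨hn, hle⟩]
  · rw [solutionLoop_stop _ _ _ _ hle, if_neg (by omega)]
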